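-- pv_equiv track=rewrite | github.com/1000zoo/python-programmers | level2/mine_picking.py | count
-- ===== SOURCE A (Python) =====
-- def count(arr):
--     d = i = s = 0
--     for a in arr:
--         if a == 'diamond':
--             d += 1
--         elif a == 'iron':
--             i += 1
--         else:
--             s += 1
--
--     return d, i, s
-- ===== SOURCE B (Python) =====
-- def count(arr):
--     d = arr.count('diamond')
--     i = arr.count('iron')
--     return d, i, len(arr) - d - i
-- ===== Notes on version B (the rewrite author's own statement) =====
-- stated objective: simpler
-- what changed: Replaces the single pass with a three-counter accumulator and per-element if/elif/else bucketing by staged passes: two separate list.count scans for the named keys, with the third bucket derived arithmetically as len(arr) - d - i (no branching, no accumulator).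
import Mathlib
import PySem

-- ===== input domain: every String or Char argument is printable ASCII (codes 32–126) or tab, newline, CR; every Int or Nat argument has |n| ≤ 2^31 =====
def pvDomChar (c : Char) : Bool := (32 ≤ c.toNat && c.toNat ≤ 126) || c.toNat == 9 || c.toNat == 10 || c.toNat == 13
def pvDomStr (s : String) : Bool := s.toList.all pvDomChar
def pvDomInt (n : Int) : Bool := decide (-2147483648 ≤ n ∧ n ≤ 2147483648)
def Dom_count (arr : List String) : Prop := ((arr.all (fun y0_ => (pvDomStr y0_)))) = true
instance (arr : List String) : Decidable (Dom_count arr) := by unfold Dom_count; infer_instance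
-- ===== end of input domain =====

-- B replaces the single accumulator pass with per-element branching by staged passes:
-- two list.count scans and an arithmetic remainder. Objective: simpler; same cost.

-- ===== PORT A =====
-- literal port of A: one fold threading the three counters d, i, s
def count (arr : List String) : Int × Int × Int :=
  let r := arr.foldl (fun (acc : Int × Int × Int) a =>
    if a = "diamond" then (acc.1 + 1, acc.2.1, acc.2.2)
    else if a = "iron" then (acc.1, acc.2.1 + 1, acc.2.2)
    else (acc.1, acc.2.1, acc.2.2 + 1)) (0, 0, 0)
  r

-- ===== PORT B =====
-- literal port of Source B: two list.count scans, remainder by subtraction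
def count_alt (arr : List String) : Int × Int × Int :=
  let d : Int := PySem.List.count arr "diamond"
  let i : Int := PySem.List.count arr "iron"
  (d, i, (arr.length : Int) - d - i)

-- ===== PRECONDITION & SPEC =====
def Spec_count (arr : List String) (out : Int × Int × Int) : Prop := out = count_alt arr
instance (arr : List String) (out : Int × Int × Int) : Decidable (Spec_count arr out) := by unfold Spec_count; infer_instance

-- ===== CLAIM (what is proved, stated in full; the proofs are below) =====
def Claim_equal_count : Prop := ∀ (arr : List String), Dom_count arr → Spec_count arr (count arr)

-- ===== LEMMAS AND PROOFS =====
theorem count_foldl_inv (arr : List String) : ∀ (acc : Int × Int × Int),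
    arr.foldl (fun (acc : Int × Int × Int) a =>
      if a = "diamond" then (acc.1 + 1, acc.2.1, acc.2.2)
      else if a = "iron" then (acc.1, acc.2.1 + 1, acc.2.2)
      else (acc.1, acc.2.1, acc.2.2 + 1)) acc
    = (acc.1 + (arr.count "diamond" : Int), acc.2.1 + (arr.count "iron" : Int),
       acc.2.2 + ((arr.length : Int) - (arr.count "diamond" : Int) - (arr.count "iron" : Int))) := by
  induction arr with
  | nil => intro acc; simp
  | cons a t ih =>
    intro acc
    simp only [List.foldl_cons, List.count_cons, List.length_cons, ih]
    rcases acc with ⟨d, i, s⟩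
    by_cases hd : a = "diamond" <;> by_cases hi : a = "iron" <;>
      simp [hd, hi, Prod.ext_iff] <;> omega

-- ===== VERDICT (by name: the statement is the Claim_ definition above) =====
theorem count_spec : Claim_equal_count := by
  intro arr _
  unfold Spec_count count count_alt
  simp only [count_foldl_inv, PySem.List.count_eq]
  simp
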